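-- pv_equiv track=rewrite | github.com/darvenommm/algorithmes_exam | practice/22.py | find_min_sum
-- ===== SOURCE A (Python) =====
-- from itertools import count
--
-- def find_min_sum(digits: list[int]) -> int:
--     match(digits):
--         case []: return 0
--         case [_]: return digits[0]
--
--     result: int = 0
--     digits = sorted(digits)
--
--     for power in count():
--         if not digits:
--             break
--
--         result += sum(digits[-2:]) * 10**power
--         digits = digits[:-2]
--
--     return result
-- ===== SOURCE B (Python) =====
-- def find_min_sum(digits: list[int]) -> int:
--     s = sorted(digits)
--     if len(s) % 2 == 1:
--         x, y, rest = s[0], 0, s[1:]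
--     else:
--         x, y, rest = 0, 0, s
--     while len(rest) >= 2:
--         x = x * 10 + rest[0]
--         y = y * 10 + rest[1]
--         rest = rest[2:]
--     return x + y
-- ===== Notes on version B (the rewrite author's own statement) =====
-- stated objective: alternative
-- what changed: Instead of A's loop that repeatedly slices off the two largest elements and accumulates pair-sums times a running power of 10, B sorts once and builds two integers front-to-back with the n = n*10 + digit idiom (seeding one with the lone smallest element when the length is odd) and returns their sum, with no power computation and no repeated list re-slicing.
import Mathlib
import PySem

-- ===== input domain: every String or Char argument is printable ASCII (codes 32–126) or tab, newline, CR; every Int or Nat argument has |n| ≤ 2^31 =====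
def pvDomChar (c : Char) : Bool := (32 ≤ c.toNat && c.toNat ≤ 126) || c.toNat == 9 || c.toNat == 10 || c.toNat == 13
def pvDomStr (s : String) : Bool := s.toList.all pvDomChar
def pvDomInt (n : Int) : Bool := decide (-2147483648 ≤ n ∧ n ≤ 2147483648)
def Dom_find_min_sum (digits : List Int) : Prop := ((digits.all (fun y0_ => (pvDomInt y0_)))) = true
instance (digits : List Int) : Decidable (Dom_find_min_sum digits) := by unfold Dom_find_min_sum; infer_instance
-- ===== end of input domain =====

-- B replaces A's slice-off-two-largest loop with a running power of 10 by two digit-built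
-- accumulators (n = n*10 + d) over the sorted list; same return value, different decomposition.

-- ===== PORT A =====
-- A's `for power in count()` loop: strip the two largest (digits[-2:]) each round.
def pvALoop (digits : List Int) (power : Nat) : Int :=
  if h : digits = [] then 0
  else
    (PySem.List.slice digits (some (-2)) none).sum * 10 ^ power
      + pvALoop (PySem.List.slice digits none (some (-2))) (power + 1)
termination_by digits.length
decreasing_by
  rw [PySem.List.slice_to_neg_ofNat digits 2 (by norm_num)]
  have : 0 < digits.length := List.length_pos_iff.mpr h
  simp [List.length_take]; omega

def find_min_sum (digits : List Int) : Int :=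
  match digits with
  | [] => 0
  | [d] => d
  | _ => pvALoop (PySem.List.sorted digits (fun x => x) false) 0

-- ===== PORT B =====
-- B's `while len(rest) >= 2` loop.
def pvBLoop (x y : Int) (rest : List Int) : Int :=
  match rest with
  | a :: b :: r => pvBLoop (x * 10 + a) (y * 10 + b) r
  | _ => x + y

def find_min_sum_alt (digits : List Int) : Int :=
  let s := PySem.List.sorted digits (fun x => x) false
  if s.length % 2 == 1 then
    pvBLoop (PySem.List.pyGetD s 0 0) 0 (PySem.List.slice s (some 1) none)
  else
    pvBLoop 0 0 s

-- ===== PRECONDITION & SPEC =====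
def Spec_find_min_sum (digits : List Int) (out : Int) : Prop := out = find_min_sum_alt digits
instance (digits : List Int) (out : Int) : Decidable (Spec_find_min_sum digits out) := by unfold Spec_find_min_sum; infer_instance

-- ===== CLAIM (what is proved, stated in full; the proofs are below) =====
def Claim_equal_find_min_sum : Prop := ∀ (digits : List Int), Dom_find_min_sum digits → Spec_find_min_sum digits (find_min_sum digits)

-- ===== LEMMAS AND PROOFS =====

-- pairs-from-the-front view of A's pairs-from-the-back accumulation, on the reversed list
def pvRev : List Int → Int
  | [] => 0
  | [a] => a
  | a :: b :: r => (a + b) + 10 * pvRev r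

theorem pvALoop_succ : ∀ n (l : List Int), l.length = n → ∀ p : Nat,
    pvALoop l (p + 1) = 10 * pvALoop l p := by
  intro n
  induction n using Nat.strong_induction_on with
  | _ n ih =>
    intro l hl p
    by_cases h : l = []
    · subst h; simp [pvALoop]
    · have hstep : ∀ q : Nat, pvALoop l q =
          (PySem.List.slice l (some (-2)) none).sum * 10 ^ q
            + pvALoop (PySem.List.slice l none (some (-2))) (q + 1) := by
        intro q; rw [pvALoop, dif_neg h]
      have hlen : 0 < l.length := List.length_pos_iff.mpr h
      have hs : (PySem.List.slice l none (some (-2))).length = l.length - 2 := by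
        rw [PySem.List.slice_to_neg_ofNat l 2 (by norm_num)]
        simp [List.length_take]
      rw [hstep (p + 1), hstep p, ih (l.length - 2) (by omega) _ hs (p + 1)]
      ring

theorem pvALoop_rev : ∀ m : List Int, pvALoop m.reverse 0 = pvRev m := by
  intro m
  match m with
  | [] => rw [pvALoop]; simp [pvRev]
  | [a] =>
    rw [pvALoop]
    simp only [List.reverse_singleton, reduceDIte, List.cons_ne_self]
    rw [PySem.List.slice_from_neg_ofNat [a] 2 (by norm_num),
        PySem.List.slice_to_neg_ofNat [a] 2 (by norm_num), pvALoop]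
    simp [pvRev]
  | a :: b :: r =>
    have hrev : (a :: b :: r).reverse = r.reverse ++ [b, a] := by simp
    rw [hrev, pvALoop]
    have hne : r.reverse ++ [b, a] ≠ [] := by simp
    simp only [hne, dif_neg, not_false_iff]
    have hlen : (r.reverse ++ [b, a]).length = r.reverse.length + 2 := by simp
    rw [PySem.List.slice_from_neg_ofNat _ 2 (by norm_num),
        PySem.List.slice_to_neg_ofNat _ 2 (by norm_num), hlen]
    have h2 : r.reverse.length + 2 - 2 = r.reverse.length := by omega
    rw [h2, List.drop_left, List.take_left,
        pvALoop_succ r.reverse.length r.reverse rfl 0, pvALoop_rev r]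
    show (b + (a + 0)) * 10 ^ 0 + 10 * pvRev r = pvRev (a :: b :: r)
    simp [pvRev]; ring

theorem pvRev_append : ∀ (u v : List Int), u.length % 2 = 0 →
    pvRev (u ++ v) = pvRev u + 10 ^ (u.length / 2) * pvRev v := by
  intro u v hu
  match u with
  | [] => simp [pvRev]
  | [a] => simp at hu
  | a :: b :: r =>
    have hr : r.length % 2 = 0 := by simp only [List.length_cons] at hu; omega
    show pvRev (a :: b :: (r ++ v)) = pvRev (a :: b :: r) + 10 ^ ((a :: b :: r).length / 2) * pvRev v
    rw [pvRev, pvRev, pvRev_append r v hr]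
    have : (a :: b :: r).length / 2 = r.length / 2 + 1 := by simp; omega
    rw [this]; ring

theorem pvBLoop_eq : ∀ (r : List Int) (x y : Int), r.length % 2 = 0 →
    pvBLoop x y r = (x + y) * 10 ^ (r.length / 2) + pvRev r.reverse := by
  intro r x y hr
  match r with
  | [] => simp [pvBLoop, pvRev]
  | [a] => simp at hr
  | a :: b :: t =>
    have ht : t.length % 2 = 0 := by simp only [List.length_cons] at hr; omega
    rw [pvBLoop, pvBLoop_eq t _ _ ht]
    have hrev : (a :: b :: t).reverse = t.reverse ++ [b, a] := by simp
    rw [hrev, pvRev_append t.reverse [b, a] (by simp only [List.length_reverse]; exact ht)]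
    have hlen : (a :: b :: t).length / 2 = t.length / 2 + 1 := by simp; omega
    rw [hlen]
    have : t.reverse.length = t.length := by simp
    rw [this]
    show (x * 10 + a + (y * 10 + b)) * 10 ^ (t.length / 2) + pvRev t.reverse
        = (x + y) * 10 ^ (t.length / 2 + 1) + (pvRev t.reverse + 10 ^ (t.length / 2) * pvRev [b, a])
    simp [pvRev]; ring

-- ===== VERDICT (by name: the statement is the Claim_ definition above) =====
theorem find_min_sum_spec : Claim_equal_find_min_sum := by
  intro digits _
  unfold Spec_find_min_sum
  match digits with
  | [] => decide
  | [d] =>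
    show d = find_min_sum_alt [d]
    simp [find_min_sum_alt, PySem.List.sorted, PySem.List.insertBy, pvBLoop, pysem]
  | a :: b :: t =>
    have hlen : (PySem.List.sorted (a :: b :: t) (fun x => x) false).length = t.length + 2 := by
      rw [(PySem.List.sorted_perm (a :: b :: t) (fun x => x) false).length_eq]
      simp
    show pvALoop (PySem.List.sorted (a :: b :: t) (fun x => x) false) 0
        = find_min_sum_alt (a :: b :: t)
    simp only [find_min_sum_alt]
    generalize PySem.List.sorted (a :: b :: t) (fun x => x) false = s at hlen ⊢
    have hA : pvALoop s 0 = pvRev s.reverse := by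
      have := pvALoop_rev s.reverse
      rwa [List.reverse_reverse] at this
    rw [hA]
    by_cases hodd : s.length % 2 = 1
    · simp only [hodd, beq_self_eq_true, if_true]
      cases s with
      | nil => simp at hlen
      | cons h t' =>
        have ht' : t'.length % 2 = 0 := by simp only [List.length_cons] at hodd; omega
        rw [PySem.List.slice_from_one]
        have hget : PySem.List.pyGetD (h :: t') 0 0 = h := by simp [pysem]
        rw [hget]
        show pvRev ((h :: t').reverse) = pvBLoop h 0 (h :: t').tail
        rw [List.tail_cons, pvBLoop_eq t' h 0 ht', List.reverse_cons,
            pvRev_append t'.reverse [h] (by simp only [List.length_reverse]; exact ht')]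
        simp only [List.length_reverse]
        show pvRev t'.reverse + 10 ^ (t'.length / 2) * pvRev [h]
            = (h + 0) * 10 ^ (t'.length / 2) + pvRev t'.reverse
        simp [pvRev]; ring
    · have heven : s.length % 2 = 0 := by omega
      simp only [heven]
      norm_num
      rw [pvBLoop_eq s 0 0 heven]
      ring
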